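-- pv_equiv track=rewrite | github.com/nallemacvill14/Clinical-Data-Specialist-Portfolio | Clinical_Data_Sorter.py | categorize_clinical_notes
-- ===== SOURCE A (Python) =====
-- def categorize_clinical_notes(notes):
--     categories = {"Mental Health": [], "Cardiovascular": []}
--
--     for note in notes:
--         if "depression" in note.lower() or "panic" in note.lower():
--             categories["Mental Health"].append(note)
--         elif "hypertension" in note.lower() or "bp" in note.lower():
--             categories["Cardiovascular"].append(note)
--
--     return categories
-- ===== SOURCE B (Python) =====
-- def _mentions(note, keywords):
--     low = note.lower()
--     return any(kw in low for kw in keywords)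
--
--
-- def categorize_clinical_notes(notes):
--     # Two independent staged passes: each bucket is built on its own by
--     # filtering the whole input; Mental-Health precedence is expressed as
--     # an explicit negative condition in the Cardiovascular filter.
--     mental = [n for n in notes if _mentions(n, ("depression", "panic"))]
--     cardio = [n for n in notes
--               if not _mentions(n, ("depression", "panic"))
--               and _mentions(n, ("hypertension", "bp"))]
--     return {"Mental Health": mental, "Cardiovascular": cardio}
-- ===== Notes on version B (the rewrite author's own statement) =====
-- stated objective: alternative
-- what changed: Replaced A's single stateful pass that routes each note through an if/elif chain into a mutable dict by two independent declarative filter passes, one per bucket, with the elif precedence expressed as an explicit negative condition; the dict is assembled once from the two finished lists.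
import Mathlib
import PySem

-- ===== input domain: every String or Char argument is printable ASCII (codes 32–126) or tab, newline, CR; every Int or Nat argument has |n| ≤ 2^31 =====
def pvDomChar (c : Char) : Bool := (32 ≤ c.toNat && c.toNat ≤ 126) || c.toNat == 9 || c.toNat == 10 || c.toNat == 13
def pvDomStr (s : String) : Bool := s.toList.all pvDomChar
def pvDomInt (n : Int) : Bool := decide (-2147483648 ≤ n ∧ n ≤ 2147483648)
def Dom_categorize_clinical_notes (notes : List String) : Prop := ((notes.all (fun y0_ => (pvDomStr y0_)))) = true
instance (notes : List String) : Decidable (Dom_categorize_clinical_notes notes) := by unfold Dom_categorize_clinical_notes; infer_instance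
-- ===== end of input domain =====

-- B replaces A's single stateful pass (if/elif routing each note into a mutable dict) by
-- two independent declarative filter passes, one per bucket (alternative; same cost).

-- ===== PORT A =====
def categorize_clinical_notes (notes : List String) : List (String × List String) :=
  (notes.foldl (fun categories note =>
      if PySem.Str.isIn "depression" (PySem.Str.lower note)
          || PySem.Str.isIn "panic" (PySem.Str.lower note) then
        categories.modify "Mental Health" [] (fun l => l ++ [note])
      else if PySem.Str.isIn "hypertension" (PySem.Str.lower note)
          || PySem.Str.isIn "bp" (PySem.Str.lower note) then
        categories.modify "Cardiovascular" [] (fun l => l ++ [note])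
      else categories)
    ((PySem.Dict.empty.insert "Mental Health" []).insert "Cardiovascular" ([] : List String))).items

-- ===== PORT B =====
def pvMentions (note : String) (keywords : List String) : Bool :=
  let low := PySem.Str.lower note
  keywords.any (fun kw => PySem.Str.isIn kw low)

def categorize_clinical_notes_alt (notes : List String) : List (String × List String) :=
  let mental := notes.filter (fun n => pvMentions n ["depression", "panic"])
  let cardio := notes.filter (fun n =>
      !pvMentions n ["depression", "panic"] && pvMentions n ["hypertension", "bp"])
  [("Mental Health", mental), ("Cardiovascular", cardio)]

-- ===== PRECONDITION & SPEC =====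
def Spec_categorize_clinical_notes (notes : List String) (out : List (String × List String)) : Prop := out = categorize_clinical_notes_alt notes
instance (notes : List String) (out : List (String × List String)) : Decidable (Spec_categorize_clinical_notes notes out) := by unfold Spec_categorize_clinical_notes; infer_instance

-- ===== CLAIM =====
def Claim_equal_categorize_clinical_notes : Prop := ∀ (notes : List String), Dom_categorize_clinical_notes notes → Spec_categorize_clinical_notes notes (categorize_clinical_notes notes)

-- ===== LEMMAS AND PROOFS =====
-- invariant: A's fold over a two-entry literal dict appends each bucket's filter
lemma pv_fold_inv (notes : List String) (a b : List String) :
    (notes.foldl (fun categories note =>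
      if PySem.Str.isIn "depression" (PySem.Str.lower note)
          || PySem.Str.isIn "panic" (PySem.Str.lower note) then
        categories.modify "Mental Health" [] (fun l => l ++ [note])
      else if PySem.Str.isIn "hypertension" (PySem.Str.lower note)
          || PySem.Str.isIn "bp" (PySem.Str.lower note) then
        categories.modify "Cardiovascular" [] (fun l => l ++ [note])
      else categories)
      (PySem.Dict.mk [("Mental Health", a), ("Cardiovascular", b)])).items
    = [("Mental Health",
          a ++ notes.filter (fun n => pvMentions n ["depression", "panic"])),
       ("Cardiovascular",
          b ++ notes.filter (fun n =>
            !pvMentions n ["depression", "panic"] && pvMentions n ["hypertension", "bp"]))] := by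
  induction notes generalizing a b with
  | nil => simp
  | cons n ns ih =>
    simp only [List.foldl_cons, List.filter_cons]
    by_cases h1 : (PySem.Str.isIn "depression" (PySem.Str.lower n)
        || PySem.Str.isIn "panic" (PySem.Str.lower n)) = true
    · have hm : pvMentions n ["depression", "panic"] = true := by
        simp [pvMentions]; simpa using h1
      rw [if_pos h1]
      have hmod : (PySem.Dict.mk [("Mental Health", a), ("Cardiovascular", b)]).modify
          "Mental Health" [] (fun l => l ++ [n])
          = PySem.Dict.mk [("Mental Health", a ++ [n]), ("Cardiovascular", b)] := by
        rfl
      rw [hmod, ih]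
      simp [hm]
    · have hm : pvMentions n ["depression", "panic"] = false := by
        simp only [pvMentions]; simp only [Bool.or_eq_true] at h1
        simp [not_or] at h1; simp [h1.1, h1.2]
      rw [if_neg h1]
      by_cases h2 : (PySem.Str.isIn "hypertension" (PySem.Str.lower n)
          || PySem.Str.isIn "bp" (PySem.Str.lower n)) = true
      · have hc : pvMentions n ["hypertension", "bp"] = true := by
          simp [pvMentions]; simpa using h2
        rw [if_pos h2]
        have hmod : (PySem.Dict.mk [("Mental Health", a), ("Cardiovascular", b)]).modify
            "Cardiovascular" [] (fun l => l ++ [n])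
            = PySem.Dict.mk [("Mental Health", a), ("Cardiovascular", b ++ [n])] := by
          rfl
        rw [hmod, ih]
        simp [hm, hc]
      · have hc : pvMentions n ["hypertension", "bp"] = false := by
          simp only [pvMentions]; simp only [Bool.or_eq_true] at h2
          simp [not_or] at h2; simp [h2.1, h2.2]
        rw [if_neg h2, ih]
        simp [hm, hc]

-- ===== VERDICT =====
theorem categorize_clinical_notes_spec : Claim_equal_categorize_clinical_notes := by
  intro notes _
  unfold Spec_categorize_clinical_notes categorize_clinical_notes categorize_clinical_notes_alt
  have hinit : (PySem.Dict.empty.insert "Mental Health" []).insert "Cardiovascular" ([] : List String)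
      = PySem.Dict.mk [("Mental Health", []), ("Cardiovascular", [])] := by rfl
  rw [hinit, pv_fold_inv]
  simp
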